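-- pv_equiv track=rewrite | github.com/marklawrence97/Evolutionary-Spatial-Games | backendtidy.py | reflective
-- ===== SOURCE A (Python) =====
-- def reflective(cells): #This extends the grid with periodic boundary conditions
--     first_col = []
--     last_col = []
--     cellreflective = []
--     for x in range(len(cells)): #creates a new grid identical to cells
--         cellreflective.append([])
--         for y in range(len(cells[x])):
--             cellreflective[x].append(cells[x][y])
--     cellreflective.insert(0,cellreflective[0]) #inserts the last row at the start of the list
--     cellreflective.append(cellreflective[-1])#appends the first row to the end of the list
--     for g in range(len(cellreflective)):
--         first_col.append(cellreflective[g][0]) #calculates the values in the first column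
--     for h in range(len(cellreflective)):
--         last_col.append(cellreflective[h][-1]) #calculates the value in the last column
--     cellfix = []
--     for x in range(len(cellreflective)): #creates a new grid identical to cells
--         cellfix.append([])
--         for y in range(len(cellreflective[x])):
--             cellfix[x].append(cellreflective[x][y])
--     for i in range(len(first_col)):
--         cellfix[i].insert(0,first_col[i])
--     for j in range(len(last_col)):
--         cellfix[j].append(last_col[j])
--     return cellfix
-- ===== SOURCE B (Python) =====
-- def reflective(cells):
--     rows = [cells[0]] + list(cells) + [cells[-1]]
--     return [[r[0]] + list(r) + [r[-1]] for r in rows]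
-- ===== Notes on version B (the rewrite author's own statement) =====
-- stated objective: simpler
-- what changed: Replaces A's two deep grid copies, two separate column lists and two index-driven insert/append passes with one row-extension list and a single per-row padding pass.
import Mathlib
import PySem

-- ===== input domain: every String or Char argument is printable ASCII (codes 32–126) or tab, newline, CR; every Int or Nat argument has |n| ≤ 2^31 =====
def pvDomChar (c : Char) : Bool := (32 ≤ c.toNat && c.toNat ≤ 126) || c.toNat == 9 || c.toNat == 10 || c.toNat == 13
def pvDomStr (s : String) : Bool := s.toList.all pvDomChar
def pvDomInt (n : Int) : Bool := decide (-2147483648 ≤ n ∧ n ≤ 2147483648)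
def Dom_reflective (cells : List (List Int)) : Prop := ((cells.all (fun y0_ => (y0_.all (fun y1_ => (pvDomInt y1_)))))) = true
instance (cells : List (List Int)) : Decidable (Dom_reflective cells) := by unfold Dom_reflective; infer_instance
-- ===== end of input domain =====

-- B pads each row in one pass over [cells[0]] ++ cells ++ [cells[-1]] instead of A's two deep
-- copies, two column lists and two index-driven mutation passes (objective: simpler).

-- ===== PORT A =====
-- Indexing is in range on Pre_ inputs; 'getD'/'getLastD' stand for cells[x], row[-1] etc.
def reflective (cells : List (List Int)) : List (List Int) :=
  -- first deep copy of cells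
  let cellreflective :=
    (List.range cells.length).foldl (fun acc x =>
      acc ++ [(List.range ((cells.getD x []).length)).foldl
                (fun row y => row ++ [(cells.getD x []).getD y 0]) []]) []
  -- cellreflective.insert(0, cellreflective[0]); cellreflective.append(cellreflective[-1])
  let cellreflective := (cellreflective.getD 0 []) :: cellreflective
  let cellreflective := cellreflective ++ [cellreflective.getLastD []]
  let first_col :=
    (List.range cellreflective.length).foldl
      (fun acc g => acc ++ [(cellreflective.getD g []).getD 0 0]) []
  let last_col :=
    (List.range cellreflective.length).foldl
      (fun acc h => acc ++ [(cellreflective.getD h []).getLastD 0]) []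
  -- second deep copy
  let cellfix :=
    (List.range cellreflective.length).foldl (fun acc x =>
      acc ++ [(List.range ((cellreflective.getD x []).length)).foldl
                (fun row y => row ++ [(cellreflective.getD x []).getD y 0]) []]) []
  -- cellfix[i].insert(0, first_col[i]); cellfix[j].append(last_col[j])
  let cellfix :=
    (List.range first_col.length).foldl
      (fun acc i => acc.modify i (fun row => (first_col.getD i 0) :: row)) cellfix
  let cellfix :=
    (List.range last_col.length).foldl
      (fun acc j => acc.modify j (fun row => row ++ [last_col.getD j 0])) cellfix
  cellfix

-- ===== PORT B =====
def reflective_alt (cells : List (List Int)) : List (List Int) :=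
  let rows := [cells.getD 0 []] ++ cells ++ [cells.getLastD []]
  rows.map (fun r => [r.getD 0 0] ++ r ++ [r.getLastD 0])

-- ===== PRECONDITION & SPEC =====
-- Pre_ excludes exactly the inputs where A raises IndexError (empty grid, or a grid
-- containing an empty row); B raises IndexError on those inputs too.
def Pre_reflective (cells : List (List Int)) : Prop :=
  cells ≠ [] ∧ ∀ r ∈ cells, r ≠ []
instance (cells : List (List Int)) : Decidable (Pre_reflective cells) := by
  unfold Pre_reflective; infer_instance
def pvWitness_reflective : List (List Int) := [[1, 2], [3, 4]]
def Spec_reflective (cells : List (List Int)) (out : List (List Int)) : Prop :=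
  out = reflective_alt cells
instance (cells : List (List Int)) (out : List (List Int)) : Decidable (Spec_reflective cells out) := by
  unfold Spec_reflective; infer_instance

-- ===== CLAIM (what is proved, stated in full; the proofs are below) =====
def Claim_equal_reflective : Prop :=
  ∀ (cells : List (List Int)), Dom_reflective cells → Pre_reflective cells →
    Spec_reflective cells (reflective cells)

-- ===== LEMMAS AND PROOFS =====

-- foldl over a range appending f i is the map of f over the range
theorem foldl_range_append {α : Type} (f : Nat → α) (n : Nat) (acc : List α) :
    (List.range n).foldl (fun acc i => acc ++ [f i]) acc = acc ++ (List.range n).map f := by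
  induction n generalizing acc with
  | zero => simp
  | succ n ih => simp [List.range_succ, ih]

-- reading every index back rebuilds the list (A's deep copy is the identity)
theorem map_range_getD {α : Type} (l : List α) (d : α) :
    (List.range l.length).map (fun i => l.getD i d) = l := by
  apply List.ext_getElem
  · simp
  · intro i h1 h2
    simp [List.getD_eq_getElem?_getD, List.getElem?_eq_getElem h2]

theorem copy_id {α : Type} (l : List α) (d : α) :
    (List.range l.length).foldl (fun acc i => acc ++ [l.getD i d]) [] = l := by
  rw [foldl_range_append, List.nil_append, map_range_getD]

-- modify-each-index fold over a value list of the same length is a zipWith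
theorem foldl_modify_zipWith {α β : Type} (f : β → α → α) (d : β) :
    ∀ (v : List β) (l : List α), v.length = l.length →
      (List.range l.length).foldl
        (fun acc i => acc.modify i (fun a => f (v.getD i d) a)) l = List.zipWith f v l := by
  intro v
  induction v with
  | nil => intro l h; simp [(List.length_eq_zero_iff).1 h.symm]
  | cons b w ih =>
    intro l h
    cases l with
    | nil => simp at h
    | cons a t =>
      have ht : w.length = t.length := by simpa using h
      have key : ∀ (n : Nat) (g : Nat → α → α) (x : α) (s : List α),
          ((List.range n).map (· + 1)).foldl (fun acc i => acc.modify i (g i)) (x :: s)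
          = x :: (List.range n).foldl (fun acc i => acc.modify i (g (i + 1))) s := by
        intro n
        induction n with
        | zero => simp
        | succ n ihn =>
          intro g x s
          rw [List.range_succ, List.map_append, List.foldl_append, List.foldl_append, ihn]
          simp
      calc (List.range (a :: t).length).foldl
              (fun acc i => acc.modify i (fun c => f ((b :: w).getD i d) c)) (a :: t)
          = ((List.range t.length).map (· + 1)).foldl
              (fun acc i => acc.modify i (fun c => f ((b :: w).getD i d) c)) (f b a :: t) := by
            simp [List.range_succ_eq_map, List.foldl_cons, List.modify]
        _ = f b a :: (List.range t.length).foldl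
              (fun acc i => acc.modify i (fun c => f (w.getD i d) c)) t := by
            rw [key]; simp
        _ = List.zipWith f (b :: w) (a :: t) := by rw [ih t ht]; rfl

theorem zipWith_map_same {α β : Type} (f : β → α → α) (g : α → β) (l : List α) :
    List.zipWith f (l.map g) l = l.map (fun a => f (g a) a) := by
  induction l with
  | nil => rfl
  | cons a t ih => simp [ih]

-- the extended row list both programs build
def pvRows (cells : List (List Int)) : List (List Int) :=
  ((cells.getD 0 []) :: cells) ++ [cells.getLastD []]

-- A's row-by-row deep copy of a grid is the identity
theorem grid_copy (l : List (List Int)) :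
    (List.range l.length).foldl (fun acc x =>
      acc ++ [(List.range ((l.getD x []).length)).foldl
                (fun row y => row ++ [(l.getD x []).getD y 0]) []]) [] = l := by
  rw [foldl_range_append, List.nil_append]
  simp only [copy_id]
  exact map_range_getD l []

theorem map_range_comp {α : Type} (rows : List (List Int)) (f : List Int → α) :
    (List.range rows.length).map (fun g => f (rows.getD g [])) = rows.map f := by
  rw [show (fun g => f (rows.getD g [])) = f ∘ (fun g => List.getD rows g []) from rfl,
      ← List.map_map, map_range_getD]

theorem reflective_eq_rows_map (cells : List (List Int)) :
    reflective cells = (pvRows cells).map (fun r => (r.getD 0 0) :: r ++ [r.getLastD 0]) := by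
  unfold reflective
  dsimp only
  simp only [grid_copy]
  have hlast : ((cells.getD 0 []) :: cells).getLastD [] = cells.getLastD [] := by
    cases cells <;> simp [List.getLastD]
  rw [hlast]
  rw [show ((cells.getD 0 []) :: cells) ++ [cells.getLastD []] = pvRows cells from rfl]
  set rows := pvRows cells with hrows
  rw [foldl_range_append, foldl_range_append]
  simp only [List.nil_append, List.length_map, List.length_range]
  rw [map_range_comp rows (fun r => r.getD 0 0), map_range_comp rows (fun r => r.getLastD 0)]
  have h1 : (List.range rows.length).foldl
      (fun acc i => acc.modify i
        (fun row => ((rows.map (fun r => r.getD 0 0)).getD i 0) :: row)) rows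
      = rows.map (fun r => (r.getD 0 0) :: r) := by
    rw [foldl_modify_zipWith (fun b (a : List Int) => b :: a) 0 _ _ (by simp)]
    rw [zipWith_map_same]
  rw [h1]
  have hpad : rows.map (fun r => r.getLastD 0)
      = (rows.map (fun r => (r.getD 0 0) :: r)).map (fun r => r.getLastD 0) := by
    simp only [List.map_map]
    apply List.map_congr_left
    intro r _; cases r <;> simp [List.getLastD]
  rw [hpad]
  have hlen : rows.length = (rows.map (fun r => (r.getD 0 0) :: r)).length := by simp
  rw [hlen]
  rw [foldl_modify_zipWith (fun b (a : List Int) => a ++ [b]) 0 _ _ (by simp)]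
  rw [zipWith_map_same]
  simp only [List.map_map]
  apply List.map_congr_left
  intro r _; cases r <;> simp [List.getLastD]

-- ===== VERDICT (by name: the statement is the Claim_ definition above) =====
theorem reflective_spec : Claim_equal_reflective := by
  intro cells _ _
  unfold Spec_reflective reflective_alt
  rw [reflective_eq_rows_map]
  rfl
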